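-- pv_equiv track=rewrite | github.com/bbbii/algorithm-for-coding-test | program/level2/무인도 여행.py | solution
-- ===== SOURCE A (Python) =====
-- def solution(maps):
--     converted_map = [list(val) for val in maps]
--     rows = len(converted_map)
--     cols = len(converted_map[0])
--     for r in range(rows):
--         for c in range(cols):
--             if converted_map[r][c] == "X":
--                 converted_map[r][c] = 0
--             else:
--                 converted_map[r][c] = int(converted_map[r][c])
--     seen = set()
--     def dfs(r, c):
--         if (r < 0 or c < 0 or (r,c) in seen or r == rows or c == cols or converted_map[r][c] == 0):
--             return 0
--         seen.add((r, c))
--         return (converted_map[r][c] + dfs(r + 1, c) + dfs(r - 1, c) + dfs(r, c + 1) + dfs(r, c - 1))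
--     areas, ans = [], []
--     for r in range(rows):
--         for c in range(cols):
--             areas.append(dfs(r, c))
--     if sum(areas) == 0:
--         return [-1]
--     for area in areas:
--         if area != 0:
--             ans.append(area)
--     ans.sort()
--     return ans
-- ===== SOURCE B (Python) =====
-- def solution(maps):
--     rows = len(maps)
--     cols = len(maps[0])
--
--     def value(r, c):
--         ch = maps[r][c]
--         return 0 if ch == "X" else int(ch)
--
--     seen = set()
--     sums = []
--     for r in range(rows):
--         for c in range(cols):
--             if (r, c) in seen or value(r, c) == 0:
--                 continue
--             total = 0
--             stack = [(r, c)]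
--             while stack:
--                 rr, cc = stack.pop()
--                 if rr < 0 or cc < 0 or rr >= rows or cc >= cols:
--                     continue
--                 if (rr, cc) in seen or value(rr, cc) == 0:
--                     continue
--                 seen.add((rr, cc))
--                 total += value(rr, cc)
--                 stack.extend([(rr, cc - 1), (rr, cc + 1), (rr - 1, cc), (rr + 1, cc)])
--             sums.append(total)
--     return sorted(sums) if sums else [-1]
-- ===== Notes on version B (the rewrite author's own statement) =====
-- stated objective: alternative
-- what changed: Replaces the recursive flood-fill over a pre-converted int grid (appending an area for every cell and filtering zeros afterwards) with an iterative explicit-stack flood fill started only at unvisited land cells, reading cell values lazily from the strings and collecting one positive sum per component directly.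
import Mathlib
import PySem

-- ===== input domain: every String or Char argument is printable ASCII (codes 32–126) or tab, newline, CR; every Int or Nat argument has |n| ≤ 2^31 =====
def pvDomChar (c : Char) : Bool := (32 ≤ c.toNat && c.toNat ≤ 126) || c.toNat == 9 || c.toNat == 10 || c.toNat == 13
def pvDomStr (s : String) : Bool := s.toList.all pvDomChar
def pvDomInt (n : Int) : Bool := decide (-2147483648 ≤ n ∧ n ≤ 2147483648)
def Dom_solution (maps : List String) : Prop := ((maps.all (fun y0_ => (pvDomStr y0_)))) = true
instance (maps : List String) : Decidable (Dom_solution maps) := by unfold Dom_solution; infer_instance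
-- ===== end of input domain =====

-- B replaces A's recursive flood-fill over a pre-converted int grid with an iterative
-- explicit-stack flood fill started only at unvisited land cells (alternative algorithm, same cost).

-- ===== PORT A =====

-- int(ch), after the conversion loop replaced 'X' by 0; Pre_ guarantees the char is a digit, so int() cannot raise
def aVal (ch : Char) : Int := if ch = 'X' then 0 else (PySem.Int.ofChars? [ch]).getD 0

-- converted_map: the conversion loop writes int values at columns 0..cols-1 of every row; characters
-- beyond column cols-1 are never converted nor read afterwards, so the port keeps the first cols columns.
def aConvert (maps : List String) : List (List Int) :=
  maps.map (fun s => (s.toList.take (maps.headD "").toList.length).map aVal)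

-- converted_map[r][c]; every access in A is guarded by the r/c checks of dfs, so the defaults are never observed
def gridGet (g : List (List Int)) (r c : Int) : Int :=
  if 0 ≤ r ∧ 0 ≤ c then (g.getD r.toNat []).getD c.toNat 0 else 0

-- dfs: Python's recursion terminates because `seen` grows; the fuel rows*cols+1 supplied by `solution`
-- always exceeds the needed recursion depth (dfsA_stable below), so the fuel-0 branch is never taken.
def dfsA (v : Int → Int → Int) (rows cols : Int) :
    Nat → Int → Int → PySem.Set (Int × Int) → Int × PySem.Set (Int × Int)
  | 0, _, _, seen => (0, seen)
  | f+1, r, c, seen =>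
    if r < 0 ∨ c < 0 ∨ (r, c) ∈ seen ∨ r = rows ∨ c = cols ∨ v r c = 0 then (0, seen)
    else
      let p1 := dfsA v rows cols f (r+1) c (PySem.Set.add seen (r, c))
      let p2 := dfsA v rows cols f (r-1) c p1.2
      let p3 := dfsA v rows cols f r (c+1) p2.2
      let p4 := dfsA v rows cols f r (c-1) p3.2
      (v r c + p1.1 + p2.1 + p3.1 + p4.1, p4.2)

def solution (maps : List String) : List Int :=
  let conv := aConvert maps
  let rows : Int := maps.length
  let cols : Int := (maps.headD "").toList.length  -- len(converted_map[0]); maps = [] raises IndexError, excluded by Pre_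
  let st := ((PySem.List.pyRange 0 rows 1).flatMap
      (fun r => (PySem.List.pyRange 0 cols 1).map (fun c => (r, c)))).foldl
    (fun (st : PySem.Set (Int × Int) × List Int) p =>
      let q := dfsA (gridGet conv) rows cols (maps.length * (maps.headD "").toList.length + 1) p.1 p.2 st.1
      (q.2, st.2 ++ [q.1]))
    (PySem.Set.empty, [])
  if st.2.foldl (fun acc a => acc + a) (0 : Int) = 0 then [-1]
  else PySem.List.sorted (st.2.foldl (fun ans a => if a ≠ 0 then ans ++ [a] else ans) []) (fun x => x) false

-- ===== PORT B =====

-- value(r, c): 0 if maps[r][c] == 'X' else int(maps[r][c]); B evaluates it only at in-range cells,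
-- so the defaults are never observed
def bVal (maps : List String) (r c : Int) : Int :=
  if 0 ≤ r ∧ 0 ≤ c then
    let ch := (maps.getD r.toNat "").toList.getD c.toNat ' '
    if ch = 'X' then 0 else (PySem.Int.ofChars? [ch]).getD 0
  else 0

-- the while loop; the Lean list head is the TOP of the Python stack (stack.pop pops the last element),
-- so extend([(r,c-1),(r,c+1),(r-1,c),(r+1,c)]) puts (r+1,c) on top.  The fuel 5*rows*cols+5 supplied by
-- solution_alt always exceeds the number of loop iterations (floodB_eq below), so fuel 0 is never reached.
def floodB (v : Int → Int → Int) (rows cols : Int) :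
    Nat → List (Int × Int) → PySem.Set (Int × Int) → Int → Int × PySem.Set (Int × Int)
  | 0, _, seen, total => (total, seen)
  | _+1, [], seen, total => (total, seen)
  | f+1, (r, c) :: rest, seen, total =>
    if r < 0 ∨ c < 0 ∨ rows ≤ r ∨ cols ≤ c then floodB v rows cols f rest seen total
    else if (r, c) ∈ seen ∨ v r c = 0 then floodB v rows cols f rest seen total
    else floodB v rows cols f ((r+1, c) :: (r-1, c) :: (r, c+1) :: (r, c-1) :: rest)
      (PySem.Set.add seen (r, c)) (total + v r c)

def solution_alt (maps : List String) : List Int :=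
  let rows : Int := maps.length
  let cols : Int := (maps.headD "").toList.length  -- len(maps[0]); maps = [] raises IndexError, excluded by Pre_
  let st := ((PySem.List.pyRange 0 rows 1).flatMap
      (fun r => (PySem.List.pyRange 0 cols 1).map (fun c => (r, c)))).foldl
    (fun (st : PySem.Set (Int × Int) × List Int) p =>
      if p ∈ st.1 ∨ bVal maps p.1 p.2 = 0 then st
      else
        let q := floodB (bVal maps) rows cols (5 * (maps.length * (maps.headD "").toList.length) + 5) [p] st.1 0
        (q.2, st.2 ++ [q.1]))
    (PySem.Set.empty, [])
  if st.2 = [] then [-1] else PySem.List.sorted st.2 (fun x => x) false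

-- ===== PRECONDITION & SPEC =====

-- Pre_ excludes exactly the inputs on which A raises: the empty list (maps[0] → IndexError), a row
-- shorter than the first row (converted_map[r][c] → IndexError in the conversion loop), and a
-- non-digit non-'X' character in the first len(maps[0]) columns of a row (int(ch) → ValueError).
def Pre_solution (maps : List String) : Prop :=
  maps ≠ [] ∧ ∀ s ∈ maps, (maps.headD "").toList.length ≤ s.toList.length ∧
    ∀ c < (maps.headD "").toList.length, s.toList.getD c ' ' = 'X' ∨ (s.toList.getD c ' ').isDigit
instance (maps : List String) : Decidable (Pre_solution maps) := by unfold Pre_solution; infer_instance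

def pvWitness_solution : List String := (["X13", "2X0"])

def Spec_solution (maps : List String) (out : List Int) : Prop := out = solution_alt maps
instance (maps : List String) (out : List Int) : Decidable (Spec_solution maps out) := by unfold Spec_solution; infer_instance

-- ===== CLAIM (what is proved, stated in full; the proofs are below) =====
def Claim_equal_solution : Prop := ∀ (maps : List String), Dom_solution maps → Pre_solution maps → Spec_solution maps (solution maps)

-- ===== LEMMAS AND PROOFS =====

-- the in-range cells, and the count of cells the shared `seen` set can still grow by
def pvGrid (rows cols : Int) : List (Int × Int) :=
  (List.range rows.toNat).flatMap (fun (i : Nat) => (List.range cols.toNat).map (fun (j : Nat) => ((i : Int), (j : Int))))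

def pvU (rows cols : Int) (seen : List (Int × Int)) : Nat :=
  ((pvGrid rows cols).filter (fun p => decide (¬ p ∈ seen))).length

def pvInGrid (rows cols : Int) (r c : Int) : Prop := 0 ≤ r ∧ r < rows ∧ 0 ≤ c ∧ c < cols

-- "the value function vanishes outside the grid" — true for A's converted map under Pre_
def pvHv (v : Int → Int → Int) (rows cols : Int) : Prop :=
  ∀ r c, v r c ≠ 0 → pvInGrid rows cols r c

lemma mem_pvGrid (rows cols : Int) (p : Int × Int) :
    p ∈ pvGrid rows cols ↔ pvInGrid rows cols p.1 p.2 := by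
  obtain ⟨r, c⟩ := p
  constructor
  · intro hm
    rw [pvGrid, List.mem_flatMap] at hm
    obtain ⟨i, hi, hm⟩ := hm
    rw [List.mem_map] at hm
    obtain ⟨j, hj, h⟩ := hm
    rw [List.mem_range] at hi hj
    injection h with h1 h2
    subst h1; subst h2
    refine ⟨?_, ?_, ?_, ?_⟩ <;> simp <;> omega
  · rintro ⟨h1, h2, h3, h4⟩
    rw [pvGrid, List.mem_flatMap]
    refine ⟨r.toNat, by rw [List.mem_range]; omega, ?_⟩
    rw [List.mem_map]
    refine ⟨c.toNat, by rw [List.mem_range]; omega, ?_⟩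
    simp [Int.toNat_of_nonneg h1, Int.toNat_of_nonneg h3]

lemma pvGrid_length (rows cols : Int) : (pvGrid rows cols).length = rows.toNat * cols.toNat := by
  simp [pvGrid, List.length_flatMap]

lemma pvU_le (rows cols : Int) (seen : List (Int × Int)) :
    pvU rows cols seen ≤ (pvGrid rows cols).length := by
  exact List.length_filter_le _ _

lemma pvU_anti (rows cols : Int) {s t : List (Int × Int)} (h : s ⊆ t) :
    pvU rows cols t ≤ pvU rows cols s := by
  apply List.Sublist.length_le
  apply List.monotone_filter_right
  intro p hp
  simp at hp ⊢
  exact fun hm => hp (h hm)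

lemma pv_subset_add (s : PySem.Set (Int × Int)) (x : Int × Int) : s ⊆ PySem.Set.add s x := by
  intro y hy
  exact (PySem.Set.mem_add s x y).mpr (Or.inl hy)

lemma pv_filter_length_lt {α : Type} (l : List α) (p q : α → Bool)
    (himp : ∀ x, p x = true → q x = true) (a : α) (ha : a ∈ l) (hq : q a = true) (hp : p a = false) :
    (l.filter p).length < (l.filter q).length := by
  induction l with
  | nil => cases ha
  | cons b t ih =>
    have hle := List.Sublist.length_le (List.monotone_filter_right t himp)
    rcases List.mem_cons.mp ha with rfl | hb
    · simp [hp, hq]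
      omega
    · have := ih hb
      simp only [List.filter_cons]
      cases hpb : p b <;> cases hqb : q b <;> simp <;> try omega
      · exact absurd (himp b hpb) (by simp [hqb])

lemma pvU_add_lt (rows cols : Int) (seen : PySem.Set (Int × Int)) (r c : Int)
    (hmem : pvInGrid rows cols r c) (hn : (r, c) ∉ seen) :
    pvU rows cols (PySem.Set.add seen (r, c)) < pvU rows cols seen := by
  unfold pvU
  apply pv_filter_length_lt _ _ _ ?_ (r, c) ?_ ?_ ?_
  · intro x hx
    simp only [decide_eq_true_eq] at hx ⊢
    exact fun hm => hx (pv_subset_add seen (r, c) hm)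
  · exact (mem_pvGrid rows cols (r, c)).mpr hmem
  · simpa using hn
  · simp [PySem.Set.mem_add]

lemma dfsA_subset (v : Int → Int → Int) (rows cols : Int) :
    ∀ (f : Nat) (r c : Int) (seen : PySem.Set (Int × Int)),
      seen ⊆ (dfsA v rows cols f r c seen).2 := by
  intro f
  induction f with
  | zero => intro r c seen; simp [dfsA]
  | succ f ih =>
    intro r c seen
    simp only [dfsA]
    split
    · simp
    · exact ((((pv_subset_add _ _).trans (ih _ _ _)).trans (ih _ _ _)).trans (ih _ _ _)).trans
        (ih _ _ _)

lemma dfsA_stable (v : Int → Int → Int) (rows cols : Int) (hv : pvHv v rows cols) :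
    ∀ (n f g : Nat) (r c : Int) (seen : PySem.Set (Int × Int)), f + g ≤ n →
      pvU rows cols seen < f → pvU rows cols seen < g →
      dfsA v rows cols f r c seen = dfsA v rows cols g r c seen := by
  intro n
  induction n with
  | zero => intro f g r c seen hfg hf hg; omega
  | succ n ih =>
    intro f g r c seen hfg hf hg
    obtain ⟨f', rfl⟩ : ∃ f', f = f' + 1 := ⟨f - 1, by omega⟩
    obtain ⟨g', rfl⟩ : ∃ g', g = g' + 1 := ⟨g - 1, by omega⟩
    simp only [dfsA]
    by_cases hguard : (r < 0 ∨ c < 0 ∨ (r, c) ∈ seen ∨ r = rows ∨ c = cols ∨ v r c = 0)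
    · simp [hguard]
    · simp only [if_neg hguard]
      have hnm : (r, c) ∉ seen := fun h => hguard (Or.inr (Or.inr (Or.inl h)))
      have hv0 : v r c ≠ 0 := fun h =>
        hguard (Or.inr (Or.inr (Or.inr (Or.inr (Or.inr h)))))
      have hU0 := pvU_add_lt rows cols seen r c (hv r c hv0) hnm
      have e1 := ih f' g' (r + 1) c (PySem.Set.add seen (r, c)) (by omega) (by omega) (by omega)
      rw [e1]
      have hU1 := pvU_anti rows cols (dfsA_subset v rows cols g' (r + 1) c (PySem.Set.add seen (r, c)))
      have e2 := ih f' g' (r - 1) c (dfsA v rows cols g' (r + 1) c (PySem.Set.add seen (r, c))).2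
        (by omega) (by omega) (by omega)
      rw [e2]
      have hU2 := pvU_anti rows cols (dfsA_subset v rows cols g' (r - 1) c
        (dfsA v rows cols g' (r + 1) c (PySem.Set.add seen (r, c))).2)
      have e3 := ih f' g' r (c + 1)
        (dfsA v rows cols g' (r - 1) c (dfsA v rows cols g' (r + 1) c (PySem.Set.add seen (r, c))).2).2
        (by omega) (by omega) (by omega)
      rw [e3]
      have hU3 := pvU_anti rows cols (dfsA_subset v rows cols g' r (c + 1)
        (dfsA v rows cols g' (r - 1) c (dfsA v rows cols g' (r + 1) c (PySem.Set.add seen (r, c))).2).2)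
      have e4 := ih f' g' r (c - 1)
        (dfsA v rows cols g' r (c + 1) (dfsA v rows cols g' (r - 1) c
          (dfsA v rows cols g' (r + 1) c (PySem.Set.add seen (r, c))).2).2).2
        (by omega) (by omega) (by omega)
      rw [e4]

-- the fuel-independent value of dfs, and dfs folded over a list of cells
def dfsL (v : Int → Int → Int) (rows cols : Int) (r c : Int) (seen : PySem.Set (Int × Int)) :
    Int × PySem.Set (Int × Int) :=
  dfsA v rows cols (pvU rows cols seen + 1) r c seen

def dfsLList (v : Int → Int → Int) (rows cols : Int) :
    List (Int × Int) → PySem.Set (Int × Int) → Int × PySem.Set (Int × Int)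
  | [], seen => (0, seen)
  | p :: rest, seen =>
    let q := dfsL v rows cols p.1 p.2 seen
    let q' := dfsLList v rows cols rest q.2
    (q.1 + q'.1, q'.2)

lemma dfsA_eq_dfsL (v : Int → Int → Int) (rows cols : Int) (hv : pvHv v rows cols)
    (f : Nat) (r c : Int) (seen : PySem.Set (Int × Int)) (hf : pvU rows cols seen < f) :
    dfsA v rows cols f r c seen = dfsL v rows cols r c seen := by
  exact dfsA_stable v rows cols hv (f + (pvU rows cols seen + 1)) f (pvU rows cols seen + 1)
    r c seen (by omega) hf (by omega)

lemma dfsL_subset (v : Int → Int → Int) (rows cols : Int) (r c : Int) (seen : PySem.Set (Int × Int)) :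
    seen ⊆ (dfsL v rows cols r c seen).2 := by
  exact dfsA_subset v rows cols _ r c seen

lemma dfsLList_append (v : Int → Int → Int) (rows cols : Int) :
    ∀ (xs ys : List (Int × Int)) (seen : PySem.Set (Int × Int)),
      dfsLList v rows cols (xs ++ ys) seen =
        ((dfsLList v rows cols xs seen).1 +
           (dfsLList v rows cols ys (dfsLList v rows cols xs seen).2).1,
         (dfsLList v rows cols ys (dfsLList v rows cols xs seen).2).2) := by
  intro xs
  induction xs with
  | nil => intro ys seen; simp [dfsLList]
  | cons p rest ih =>
    intro ys seen
    simp only [List.cons_append, dfsLList]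
    rw [ih]
    refine Prod.ext ?_ rfl
    dsimp only
    ring

lemma dfsL_unfold (v : Int → Int → Int) (rows cols : Int) (hv : pvHv v rows cols)
    (r c : Int) (seen : PySem.Set (Int × Int)) :
    dfsL v rows cols r c seen =
      if (r, c) ∈ seen ∨ v r c = 0 then (0, seen)
      else
        (v r c + (dfsLList v rows cols [(r+1, c), (r-1, c), (r, c+1), (r, c-1)]
            (PySem.Set.add seen (r, c))).1,
         (dfsLList v rows cols [(r+1, c), (r-1, c), (r, c+1), (r, c-1)]
            (PySem.Set.add seen (r, c))).2) := by
  by_cases hc : ((r, c) ∈ seen ∨ v r c = 0)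
  · rw [if_pos hc]
    have hg : (r < 0 ∨ c < 0 ∨ (r, c) ∈ seen ∨ r = rows ∨ c = cols ∨ v r c = 0) := by tauto
    unfold dfsL
    simp only [dfsA, if_pos hg]
  · rw [if_neg hc]
    have hv0 : v r c ≠ 0 := fun h => hc (Or.inr h)
    have hnm : (r, c) ∉ seen := fun h => hc (Or.inl h)
    obtain ⟨hr0, hrR, hc0, hcC⟩ := hv r c hv0
    have hg : ¬(r < 0 ∨ c < 0 ∨ (r, c) ∈ seen ∨ r = rows ∨ c = cols ∨ v r c = 0) := by
      simp only [not_or]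
      exact ⟨by omega, by omega, hnm, by omega, by omega, hv0⟩
    unfold dfsL
    simp only [dfsA, if_neg hg]
    have hU0 := pvU_add_lt rows cols seen r c ⟨hr0, hrR, hc0, hcC⟩ hnm
    have e1 := dfsA_eq_dfsL v rows cols hv (pvU rows cols seen) (r + 1) c
      (PySem.Set.add seen (r, c)) (by omega)
    rw [e1]
    have hU1 := pvU_anti rows cols (dfsL_subset v rows cols (r + 1) c (PySem.Set.add seen (r, c)))
    have e2 := dfsA_eq_dfsL v rows cols hv (pvU rows cols seen) (r - 1) c
      (dfsL v rows cols (r + 1) c (PySem.Set.add seen (r, c))).2 (by omega)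
    rw [e2]
    have hU2 := pvU_anti rows cols (dfsL_subset v rows cols (r - 1) c
      (dfsL v rows cols (r + 1) c (PySem.Set.add seen (r, c))).2)
    have e3 := dfsA_eq_dfsL v rows cols hv (pvU rows cols seen) r (c + 1)
      (dfsL v rows cols (r - 1) c (dfsL v rows cols (r + 1) c (PySem.Set.add seen (r, c))).2).2
      (by omega)
    rw [e3]
    have hU3 := pvU_anti rows cols (dfsL_subset v rows cols r (c + 1)
      (dfsL v rows cols (r - 1) c (dfsL v rows cols (r + 1) c (PySem.Set.add seen (r, c))).2).2)
    have e4 := dfsA_eq_dfsL v rows cols hv (pvU rows cols seen) r (c - 1)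
      (dfsL v rows cols r (c + 1) (dfsL v rows cols (r - 1) c
        (dfsL v rows cols (r + 1) c (PySem.Set.add seen (r, c))).2).2).2 (by omega)
    rw [e4]
    simp only [dfsLList]
    refine Prod.ext ?_ rfl
    dsimp only
    ring

lemma dfsA_nonneg (v : Int → Int → Int) (rows cols : Int) (hnn : ∀ r c, 0 ≤ v r c) :
    ∀ (f : Nat) (r c : Int) (seen : PySem.Set (Int × Int)), 0 ≤ (dfsA v rows cols f r c seen).1 := by
  intro f
  induction f with
  | zero => intro r c seen; simp [dfsA]
  | succ f ih =>
    intro r c seen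
    simp only [dfsA]
    split
    · simp
    · exact add_nonneg (add_nonneg (add_nonneg (add_nonneg (hnn r c) (ih _ _ _)) (ih _ _ _))
        (ih _ _ _)) (ih _ _ _)

lemma dfsLList_nonneg (v : Int → Int → Int) (rows cols : Int) (hnn : ∀ r c, 0 ≤ v r c) :
    ∀ (l : List (Int × Int)) (seen : PySem.Set (Int × Int)), 0 ≤ (dfsLList v rows cols l seen).1 := by
  intro l
  induction l with
  | nil => intro seen; simp [dfsLList]
  | cons p rest ih =>
    intro seen
    exact add_nonneg (dfsA_nonneg v rows cols hnn _ p.1 p.2 seen) (ih _)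

lemma floodB_eq (v vB : Int → Int → Int) (rows cols : Int) (hv : pvHv v rows cols)
    (heq : ∀ r c, pvInGrid rows cols r c → vB r c = v r c) :
    ∀ (f : Nat) (stack : List (Int × Int)) (seen : PySem.Set (Int × Int)) (total : Int),
      5 * pvU rows cols seen + stack.length < f →
      floodB vB rows cols f stack seen total =
        (total + (dfsLList v rows cols stack seen).1, (dfsLList v rows cols stack seen).2) := by
  intro f
  induction f with
  | zero => intro stack seen total hf; omega
  | succ f ih =>
    intro stack seen total hf
    match stack with
    | [] => simp [floodB, dfsLList]
    | (r, c) :: rest =>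
      simp only [List.length_cons] at hf
      by_cases h1 : (r < 0 ∨ c < 0 ∨ rows ≤ r ∨ cols ≤ c)
      · have hv0 : v r c = 0 := by
          by_contra hne
          have := hv r c hne
          unfold pvInGrid at this
          omega
        have hstep : floodB vB rows cols (f + 1) ((r, c) :: rest) seen total
            = floodB vB rows cols f rest seen total := by
          simp only [floodB, if_pos h1]
        rw [hstep, ih rest seen total (by omega)]
        have hL : dfsL v rows cols r c seen = (0, seen) := by
          rw [dfsL_unfold v rows cols hv, if_pos (Or.inr hv0)]
        simp only [dfsLList, hL]
        refine Prod.ext ?_ rfl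
        dsimp only
        ring
      · have hin : pvInGrid rows cols r c := by unfold pvInGrid; omega
        have hveq := heq r c hin
        by_cases h2 : ((r, c) ∈ seen ∨ vB r c = 0)
        · have hcond : ((r, c) ∈ seen ∨ v r c = 0) := by rw [← hveq]; exact h2
          have hstep : floodB vB rows cols (f + 1) ((r, c) :: rest) seen total
              = floodB vB rows cols f rest seen total := by
            simp only [floodB, if_neg h1, if_pos h2]
          rw [hstep, ih rest seen total (by omega)]
          have hL : dfsL v rows cols r c seen = (0, seen) := by
            rw [dfsL_unfold v rows cols hv, if_pos hcond]
          simp only [dfsLList, hL]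
          refine Prod.ext ?_ rfl
          dsimp only
          ring
        · have hnm : (r, c) ∉ seen := fun h => h2 (Or.inl h)
          have hv0 : v r c ≠ 0 := by rw [← hveq]; exact fun h => h2 (Or.inr h)
          have hstep : floodB vB rows cols (f + 1) ((r, c) :: rest) seen total
              = floodB vB rows cols f ((r+1, c) :: (r-1, c) :: (r, c+1) :: (r, c-1) :: rest)
                  (PySem.Set.add seen (r, c)) (total + vB r c) := by
            simp only [floodB, if_neg h1, if_neg h2]
          have hU0 := pvU_add_lt rows cols seen r c hin hnm
          rw [hstep, ih ((r+1, c) :: (r-1, c) :: (r, c+1) :: (r, c-1) :: rest)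
            (PySem.Set.add seen (r, c)) (total + vB r c) (by simp only [List.length_cons]; omega)]
          have hlist : ((r+1, c) :: (r-1, c) :: (r, c+1) :: (r, c-1) :: rest)
              = [(r+1, c), (r-1, c), (r, c+1), (r, c-1)] ++ rest := rfl
          rw [hlist, dfsLList_append]
          have hL := dfsL_unfold v rows cols hv r c seen
          rw [if_neg (by rw [← hveq] at *; exact h2)] at hL
          conv_rhs => rw [show dfsLList v rows cols ((r, c) :: rest) seen
            = ((dfsL v rows cols r c seen).1 + (dfsLList v rows cols rest (dfsL v rows cols r c seen).2).1,
               (dfsLList v rows cols rest (dfsL v rows cols r c seen).2).2) from rfl]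
          rw [hL]
          refine Prod.ext ?_ rfl
          dsimp only
          rw [hveq]
          ring

lemma pv_sum_zero_iff (l : List Int) (h : ∀ a ∈ l, 0 ≤ a) :
    (l.foldl (fun acc a => acc + a) (0 : Int) = 0 ↔ l.filter (fun a => decide (a ≠ 0)) = []) := by
  have hs : l.foldl (fun acc a => acc + a) (0 : Int) = l.sum := by
    rw [PySem.List.foldl_add (g := fun x => x)]
    simp
  rw [hs]
  clear hs
  induction l with
  | nil => simp
  | cons a t ih =>
    have ha := h a (List.mem_cons_self ..)
    have ht : ∀ x ∈ t, 0 ≤ x := fun x hx => h x (List.mem_cons_of_mem a hx)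
    have hts : 0 ≤ t.sum := List.sum_nonneg ht
    simp only [List.sum_cons, List.filter_cons]
    by_cases h0 : a = 0
    · subst h0
      simpa using ih ht
    · have hne : a + t.sum ≠ 0 := by
        have : 0 < a := lt_of_le_of_ne ha (Ne.symm h0)
        omega
      simp [h0, hne]

lemma pv_digit_cases (c : Char) (h : c.isDigit = true) :
    c ∈ ['0', '1', '2', '3', '4', '5', '6', '7', '8', '9'] := by
  rcases c with ⟨⟨⟨v, hv⟩⟩, hc⟩
  simp [Char.isDigit, UInt32.le_iff_toNat_le] at h
  simp [List.mem_cons, Char.ext_iff, UInt32.ext_iff]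
  omega

lemma aVal_nonneg (ch : Char) (h : ch = 'X' ∨ ch.isDigit = true) : 0 ≤ aVal ch := by
  rcases h with h | h
  · simp [aVal, h]
  · have h10 := pv_digit_cases ch h
    simp only [List.mem_cons, List.not_mem_nil, or_false] at h10
    rcases h10 with h10 | h10 | h10 | h10 | h10 | h10 | h10 | h10 | h10 | h10 <;> subst h10 <;> decide

lemma pvFold (v vB : Int → Int → Int) (rows cols : Int)
    (hv : pvHv v rows cols) (hnn : ∀ r c, 0 ≤ v r c)
    (heq : ∀ r c, pvInGrid rows cols r c → vB r c = v r c)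
    (fa fb : Nat) (hfa : (pvGrid rows cols).length < fa)
    (hfb : 5 * (pvGrid rows cols).length + 1 < fb) :
    ∀ (starts : List (Int × Int)), (∀ p ∈ starts, pvInGrid rows cols p.1 p.2) →
    ∀ (seen : PySem.Set (Int × Int)) (areas sums : List Int),
      areas.filter (fun a => decide (a ≠ 0)) = sums → (∀ a ∈ areas, 0 ≤ a) →
      ((starts.foldl (fun (st : PySem.Set (Int × Int) × List Int) p =>
          let q := dfsA v rows cols fa p.1 p.2 st.1
          (q.2, st.2 ++ [q.1])) (seen, areas)).2.filter (fun a => decide (a ≠ 0))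
        = (starts.foldl (fun (st : PySem.Set (Int × Int) × List Int) p =>
            if p ∈ st.1 ∨ vB p.1 p.2 = 0 then st
            else
              let q := floodB vB rows cols fb [p] st.1 0
              (q.2, st.2 ++ [q.1])) (seen, sums)).2)
      ∧ (∀ a ∈ (starts.foldl (fun (st : PySem.Set (Int × Int) × List Int) p =>
          let q := dfsA v rows cols fa p.1 p.2 st.1
          (q.2, st.2 ++ [q.1])) (seen, areas)).2, 0 ≤ a) := by
  intro starts
  induction starts with
  | nil =>
    intro _ seen areas sums hfil hpos
    exact ⟨hfil, hpos⟩
  | cons p ps ih =>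
    intro hmem seen areas sums hfil hpos
    obtain ⟨r, c⟩ := p
    have hin : pvInGrid rows cols r c := hmem (r, c) (List.mem_cons_self ..)
    have hmem' : ∀ q ∈ ps, pvInGrid rows cols q.1 q.2 := fun q hq => hmem q (List.mem_cons_of_mem _ hq)
    have hU : pvU rows cols seen < fa := lt_of_le_of_lt (pvU_le rows cols seen) hfa
    have hA : dfsA v rows cols fa r c seen = dfsL v rows cols r c seen :=
      dfsA_eq_dfsL v rows cols hv fa r c seen hU
    have hveq := heq r c hin
    simp only [List.foldl_cons]
    by_cases hcond : ((r, c) ∈ seen ∨ vB r c = 0)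
    · have hcond' : ((r, c) ∈ seen ∨ v r c = 0) := by rw [← hveq]; exact hcond
      have hL : dfsL v rows cols r c seen = (0, seen) := by
        rw [dfsL_unfold v rows cols hv, if_pos hcond']
      have hstepA : ((dfsA v rows cols fa r c seen).2, areas ++ [(dfsA v rows cols fa r c seen).1])
          = (seen, areas ++ [(0 : Int)]) := by
        rw [hA, hL]
      have hstepB : (if (r, c) ∈ seen ∨ vB r c = 0 then (seen, sums)
            else ((floodB vB rows cols fb [(r, c)] seen 0).2,
              sums ++ [(floodB vB rows cols fb [(r, c)] seen 0).1])) = (seen, sums) := by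
        rw [if_pos hcond]
      rw [hstepA, hstepB]
      refine ih hmem' seen (areas ++ [0]) sums ?_ ?_
      · rw [List.filter_append, hfil]
        simp
      · intro a ha
        rcases List.mem_append.mp ha with h | h
        · exact hpos a h
        · simp at h; omega
    · have hnm : (r, c) ∉ seen := fun h => hcond (Or.inl h)
      have hv0 : v r c ≠ 0 := by rw [← hveq]; exact fun h => hcond (Or.inr h)
      have hL := dfsL_unfold v rows cols hv r c seen
      rw [if_neg (fun h => hcond (by rw [← hveq] at h; exact h))] at hL
      have hnb : 0 ≤ (dfsLList v rows cols [(r+1, c), (r-1, c), (r, c+1), (r, c-1)]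
          (PySem.Set.add seen (r, c))).1 := dfsLList_nonneg v rows cols hnn _ _
      have hvpos : 0 < v r c := lt_of_le_of_ne (hnn r c) (Ne.symm hv0)
      have hspos : 0 < (dfsL v rows cols r c seen).1 := by
        rw [hL]
        dsimp only
        omega
      have hflood := floodB_eq v vB rows cols hv heq fb [(r, c)] seen 0
        (by
          have := pvU_le rows cols seen
          simp only [List.length_cons, List.length_nil]
          omega)
      have hone : dfsLList v rows cols [(r, c)] seen
          = ((dfsL v rows cols r c seen).1 + 0, (dfsL v rows cols r c seen).2) := rfl
      have hstepA : ((dfsA v rows cols fa r c seen).2, areas ++ [(dfsA v rows cols fa r c seen).1])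
          = ((dfsL v rows cols r c seen).2, areas ++ [(dfsL v rows cols r c seen).1]) := by
        rw [hA]
      have hstepB : (if (r, c) ∈ seen ∨ vB r c = 0 then (seen, sums)
            else ((floodB vB rows cols fb [(r, c)] seen 0).2,
              sums ++ [(floodB vB rows cols fb [(r, c)] seen 0).1]))
          = ((dfsL v rows cols r c seen).2, sums ++ [(dfsL v rows cols r c seen).1]) := by
        rw [if_neg hcond, hflood, hone]
        refine Prod.ext rfl ?_
        dsimp only
        rw [show (0 : Int) + ((dfsL v rows cols r c seen).1 + 0) = (dfsL v rows cols r c seen).1 by ring]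
      rw [hstepA, hstepB]
      refine ih hmem' (dfsL v rows cols r c seen).2 (areas ++ [(dfsL v rows cols r c seen).1])
        (sums ++ [(dfsL v rows cols r c seen).1]) ?_ ?_
      · have hs0 : (dfsL v rows cols r c seen).1 ≠ 0 := by omega
        rw [List.filter_append, hfil]
        congr 1
        simp [hs0]
      · intro a ha
        rcases List.mem_append.mp ha with h | h
        · exact hpos a h
        · simp at h; omega

lemma pv_row_ge (maps : List String) (hpre : Pre_solution maps) (i : Nat) (hi : i < maps.length) :
    (maps.headD "").toList.length ≤ (maps[i]'hi).toList.length :=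
  (hpre.2 _ (List.getElem_mem hi)).1

lemma pv_char_ok (maps : List String) (hpre : Pre_solution maps) (i : Nat) (hi : i < maps.length)
    (j : Nat) (hj : j < (maps.headD "").toList.length) :
    (maps[i]'hi).toList.getD j ' ' = 'X' ∨ ((maps[i]'hi).toList.getD j ' ').isDigit :=
  (hpre.2 _ (List.getElem_mem hi)).2 j hj

lemma pv_gridGet_eq (maps : List String) (hpre : Pre_solution maps) (r c : Int)
    (h0 : 0 ≤ r) (h0c : 0 ≤ c) (hr : r.toNat < maps.length)
    (hc : c.toNat < (maps.headD "").toList.length) :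
    gridGet (aConvert maps) r c = aVal ((maps[r.toNat]'hr).toList.getD c.toNat ' ') := by
  unfold gridGet aConvert
  rw [if_pos ⟨h0, h0c⟩]
  have hlen : r.toNat < (maps.map
      (fun s => (s.toList.take (maps.headD "").toList.length).map aVal)).length := by
    simpa using hr
  rw [List.getD_eq_getElem _ _ hlen, List.getElem_map]
  have hrowlen : c.toNat <
      (((maps[r.toNat]'hr).toList.take (maps.headD "").toList.length).map aVal).length := by
    rw [List.length_map, List.length_take]
    exact lt_min hc (lt_of_lt_of_le hc (pv_row_ge maps hpre r.toNat hr))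
  rw [List.getD_eq_getElem _ _ hrowlen, List.getElem_map, List.getElem_take]
  congr 1
  rw [List.getD_eq_getElem _ _ (lt_of_lt_of_le hc (pv_row_ge maps hpre r.toNat hr))]

lemma pv_gridGet_zero (maps : List String) (_hpre : Pre_solution maps) (r c : Int)
    (h : ¬(0 ≤ r ∧ r.toNat < maps.length ∧ 0 ≤ c ∧ c.toNat < (maps.headD "").toList.length)) :
    gridGet (aConvert maps) r c = 0 := by
  unfold gridGet aConvert
  by_cases hs : (0 ≤ r ∧ 0 ≤ c)
  · rw [if_pos hs]
    by_cases hr : r.toNat < maps.length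
    · have hlen : r.toNat < (maps.map
          (fun s => (s.toList.take (maps.headD "").toList.length).map aVal)).length := by
        simpa using hr
      rw [List.getD_eq_getElem _ _ hlen, List.getElem_map]
      have hc : ¬ c.toNat < (maps.headD "").toList.length := by tauto
      apply List.getD_eq_default
      rw [List.length_map, List.length_take]
      omega
    · have hout : (maps.map
          (fun s => (s.toList.take (maps.headD "").toList.length).map aVal)).getD r.toNat []
          = [] := List.getD_eq_default _ _ (by simpa using Nat.le_of_not_lt hr)
      rw [hout]
      simp
  · rw [if_neg hs]

lemma pv_hvA (maps : List String) (hpre : Pre_solution maps) :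
    pvHv (gridGet (aConvert maps)) (maps.length : Int) ((maps.headD "").toList.length : Int) := by
  intro r c h
  by_cases hall : (0 ≤ r ∧ r.toNat < maps.length ∧ 0 ≤ c ∧ c.toNat < (maps.headD "").toList.length)
  · obtain ⟨a, b, d, e⟩ := hall
    exact ⟨a, by omega, d, by omega⟩
  · exact absurd (pv_gridGet_zero maps hpre r c hall) h

lemma pv_hnnA (maps : List String) (hpre : Pre_solution maps) :
    ∀ r c, 0 ≤ gridGet (aConvert maps) r c := by
  intro r c
  by_cases hall : (0 ≤ r ∧ r.toNat < maps.length ∧ 0 ≤ c ∧ c.toNat < (maps.headD "").toList.length)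
  · obtain ⟨a, b, d, e⟩ := hall
    rw [pv_gridGet_eq maps hpre r c a d b e]
    exact aVal_nonneg _ (pv_char_ok maps hpre r.toNat b c.toNat e)
  · rw [pv_gridGet_zero maps hpre r c hall]

lemma pv_heqA (maps : List String) (hpre : Pre_solution maps) :
    ∀ r c, pvInGrid (maps.length : Int) ((maps.headD "").toList.length : Int) r c →
      bVal maps r c = gridGet (aConvert maps) r c := by
  intro r c hin
  obtain ⟨h1, h2, h3, h4⟩ := hin
  have hr : r.toNat < maps.length := by omega
  have hc : c.toNat < (maps.headD "").toList.length := by omega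
  rw [pv_gridGet_eq maps hpre r c h1 h3 hr hc]
  unfold bVal
  rw [if_pos ⟨h1, h3⟩]
  rw [List.getD_eq_getElem _ _ hr]
  simp [aVal]

lemma pv_mem_starts (rows cols : Int) (p : Int × Int)
    (h : p ∈ (PySem.List.pyRange 0 rows 1).flatMap
      (fun r => (PySem.List.pyRange 0 cols 1).map (fun c => (r, c)))) :
    pvInGrid rows cols p.1 p.2 := by
  obtain ⟨r, hr, hm⟩ := List.mem_flatMap.mp h
  obtain ⟨c, hc, rfl⟩ := List.mem_map.mp hm
  rw [PySem.List.mem_pyRange_one] at hr hc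
  exact ⟨hr.1, hr.2, hc.1, hc.2⟩

lemma pv_final (areas sums : List Int) (hfil : areas.filter (fun a => decide (a ≠ 0)) = sums)
    (hpos : ∀ a ∈ areas, 0 ≤ a) :
    (if areas.foldl (fun acc a => acc + a) (0 : Int) = 0 then [-1]
     else PySem.List.sorted (areas.foldl (fun ans a => if a ≠ 0 then ans ++ [a] else ans) [])
       (fun x => x) false)
    = (if sums = [] then [-1] else PySem.List.sorted sums (fun x => x) false) := by
  have h1 := pv_sum_zero_iff areas hpos
  have h2 : areas.foldl (fun ans a => if a ≠ 0 then ans ++ [a] else ans) ([] : List Int)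
      = areas.filter (fun a => decide (a ≠ 0)) := by
    rw [PySem.List.foldl_append_ite_eq_filter]
    simp
  by_cases hz : sums = []
  · rw [if_pos hz, if_pos (h1.mpr (by rw [hfil, hz]))]
  · rw [if_neg hz, if_neg (fun hc => hz (by rw [← hfil]; exact h1.mp hc)), h2, hfil]

-- ===== VERDICT (by name: the statement is the Claim_ definition above) =====
theorem solution_spec : Claim_equal_solution := by
  unfold Claim_equal_solution
  intro maps _ hpre
  unfold Spec_solution
  simp only [solution, solution_alt]
  obtain ⟨hfil, hpos⟩ := pvFold (gridGet (aConvert maps)) (bVal maps)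
      (maps.length : Int) ((maps.headD "").toList.length : Int)
      (pv_hvA maps hpre) (pv_hnnA maps hpre) (pv_heqA maps hpre)
      (maps.length * (maps.headD "").toList.length + 1)
      (5 * (maps.length * (maps.headD "").toList.length) + 5)
      (by rw [pvGrid_length]; simp)
      (by rw [pvGrid_length]; simp)
      ((PySem.List.pyRange 0 (maps.length : Int) 1).flatMap
        (fun r => (PySem.List.pyRange 0 ((maps.headD "").toList.length : Int) 1).map
          (fun c => (r, c))))
      (fun p hp => pv_mem_starts _ _ p hp)
      PySem.Set.empty [] [] rfl (by simp)
  exact pv_final _ _ hfil hpos
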